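-- pv_equiv track=rewrite | github.com/w-kibor/Data-Structures-and-Algorithms | Logic Building Problems/Medium Problems/divisibility_by_13.py | is_divisible_by_13
-- ===== SOURCE A (Python) =====
-- def is_divisible_by_13(s: str) -> bool:
--     """Check divisibility by 13 by computing modulo iteratively."""
--     if not s:
--         return False
--     if s[0] == '-':
--         s = s[1:]
--     mod = 0
--     for ch in s:
--         mod = (mod * 10 + (ord(ch) - ord('0'))) % 13
--     return mod == 0
-- ===== SOURCE B (Python) =====
-- def is_divisible_by_13(s: str) -> bool:
--     """Divisibility by 13 via alternating sum of 3-char blocks from the right (1000 == -1 mod 13)."""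
--     if not s:
--         return False
--     if s[0] == '-':
--         s = s[1:]
--     total = 0
--     sign = 1
--     i = len(s)
--     while i > 0:
--         j = max(i - 3, 0)
--         val = 0
--         for ch in s[j:i]:
--             val = val * 10 + (ord(ch) - ord('0'))
--         total += sign * val
--         sign = -sign
--         i = j
--     return total % 13 == 0
-- ===== Notes on version B (the rewrite author's own statement) =====
-- stated objective: alternative
-- what changed: Replaces the left-to-right Horner fold with per-step mod by an alternating sum of 3-character blocks taken from the right (using 1000 ≡ -1 mod 13), with one final mod.
import Mathlib
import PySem

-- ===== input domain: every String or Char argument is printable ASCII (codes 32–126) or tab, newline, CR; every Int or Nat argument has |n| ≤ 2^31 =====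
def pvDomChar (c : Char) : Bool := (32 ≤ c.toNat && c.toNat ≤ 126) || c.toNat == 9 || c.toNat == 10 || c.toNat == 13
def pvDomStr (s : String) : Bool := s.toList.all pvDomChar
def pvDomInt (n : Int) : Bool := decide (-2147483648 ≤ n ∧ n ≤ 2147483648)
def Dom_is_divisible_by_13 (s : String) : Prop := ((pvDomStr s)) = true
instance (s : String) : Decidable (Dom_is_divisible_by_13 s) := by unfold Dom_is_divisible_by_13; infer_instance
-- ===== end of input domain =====

-- B replaces A's per-character Horner mod fold by an alternating sum of 3-character blocks
-- taken from the right (1000 ≡ -1 mod 13) with a single final mod (alternative decomposition, same cost).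

-- ===== PORT A =====
-- the loop: mod = (mod * 10 + (ord(ch) - ord('0'))) % 13 over the chars
def pvALoop : List Char → Int → Int
  | [], m => m
  | c :: r, m => pvALoop r (PySem.Int.mod (m * 10 + ((c.toNat : Int) - 48)) 13)

def is_divisible_by_13 (s : String) : Bool :=
  match s.toList with
  | [] => false
  | c :: rest =>
    let l := if c = '-' then rest else c :: rest
    decide (pvALoop l 0 = 0)

-- ===== PORT B =====
-- inner loop: val = val * 10 + (ord(ch) - ord('0')) over one block
def pvGrpVal (g : List Char) : Int :=
  List.foldl (fun v c => v * 10 + ((c.toNat : Int) - 48)) 0 g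

-- outer while loop over the block index i, stepping down by 3; Nat subtraction gives j = max(i-3, 0)
def pvBlockLoop (l : List Char) (i : Nat) (total sign : Int) : Int :=
  if i = 0 then total
  else
    let j := i - 3
    let val := pvGrpVal ((l.drop j).take (i - j))
    pvBlockLoop l j (total + sign * val) (-sign)
termination_by i
decreasing_by omega

def is_divisible_by_13_alt (s : String) : Bool :=
  match s.toList with
  | [] => false
  | c :: rest =>
    let l := if c = '-' then rest else c :: rest
    decide (PySem.Int.mod (pvBlockLoop l l.length 0 1) 13 = 0)

-- ===== PRECONDITION & SPEC =====
def Spec_is_divisible_by_13 (s : String) (out : Bool) : Prop := out = is_divisible_by_13_alt s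
instance (s : String) (out : Bool) : Decidable (Spec_is_divisible_by_13 s out) := by unfold Spec_is_divisible_by_13; infer_instance

-- ===== CLAIM (what is proved, stated in full; the proofs are below) =====
def Claim_equal_is_divisible_by_13 : Prop := ∀ (s : String), Dom_is_divisible_by_13 s → Spec_is_divisible_by_13 s (is_divisible_by_13 s)

-- ===== LEMMAS AND PROOFS =====

-- Horner step and full (un-modded) Horner value of a digit list
def pvStep (m : Int) (c : Char) : Int := m * 10 + ((c.toNat : Int) - 48)

theorem pvALoop_eq (l : List Char) : ∀ (m : Int), pvALoop l (m % 13) = (List.foldl pvStep m l) % 13 := by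
  induction l with
  | nil => intro m; simp [pvALoop]
  | cons c r ih =>
    intro m
    show pvALoop r (PySem.Int.mod ((m % 13) * 10 + ((c.toNat : Int) - 48)) 13) = _
    rw [PySem.Int.mod_eq_emod_of_pos (by norm_num)]
    have h : ((m % 13) * 10 + ((c.toNat : Int) - 48)) % 13 = (pvStep m c) % 13 := by
      unfold pvStep; omega
    rw [h]
    simpa using ih (pvStep m c)

theorem pvFold_acc (l : List Char) : ∀ (a : Int),
    List.foldl pvStep a l = a * 10 ^ l.length + List.foldl pvStep 0 l := by
  induction l with
  | nil => intro a; simp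
  | cons c r ih =>
    intro a
    rw [List.foldl_cons, ih (pvStep a c)]
    conv_rhs => rw [List.foldl_cons, ih (pvStep 0 c)]
    simp only [List.length_cons]
    unfold pvStep
    ring

theorem pvGrpVal_eq (g : List Char) : pvGrpVal g = List.foldl pvStep 0 g := rfl

theorem pvBlockLoop_modeq (l : List Char) : ∀ (i : Nat), i ≤ l.length →
    ∀ (total sign : Int), sign = 1 ∨ sign = -1 →
    pvBlockLoop l i total sign ≡ total + sign * List.foldl pvStep 0 (l.take i) [ZMOD 13] := by
  intro i
  induction i using Nat.strong_induction_on with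
  | _ i ih =>
    intro hil total sign hsign
    rw [pvBlockLoop]
    by_cases h0 : i = 0
    · simp [h0]
    · simp only [h0, if_false]
      have hrec := ih (i - 3) (by omega) (by omega)
        (total + sign * pvGrpVal ((l.drop (i - 3)).take (i - (i - 3)))) (-sign)
        (by rcases hsign with h | h <;> [right; left] <;> simp [h])
      refine hrec.trans ?_
      have hsplit : l.take i = l.take (i - 3) ++ (l.drop (i - 3)).take (i - (i - 3)) := by
        conv_lhs => rw [show i = (i - 3) + (i - (i - 3)) from by omega]
        rw [List.take_add]
      have hglen : ((l.drop (i - 3)).take (i - (i - 3))).length = i - (i - 3) := by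
        rw [List.length_take, List.length_drop]; omega
      have hfold : List.foldl pvStep 0 (l.take i)
          = List.foldl pvStep 0 (l.take (i - 3)) * 10 ^ (i - (i - 3))
            + pvGrpVal ((l.drop (i - 3)).take (i - (i - 3))) := by
        rw [hsplit, List.foldl_append, pvFold_acc, hglen, pvGrpVal_eq]
      rw [hfold]
      apply Int.modEq_iff_dvd.mpr
      by_cases hbig : 3 ≤ i
      · rw [show i - (i - 3) = 3 from by omega]
        exact ⟨sign * List.foldl pvStep 0 (l.take (i - 3)) * 77, by ring⟩
      · have hVj0 : List.foldl pvStep 0 (l.take (i - 3)) = 0 := by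
          rw [show i - 3 = 0 from by omega]; rfl
        exact ⟨0, by rw [hVj0]; ring⟩

theorem pv_key (l : List Char) :
    decide (pvALoop l 0 = 0) = decide (PySem.Int.mod (pvBlockLoop l l.length 0 1) 13 = 0) := by
  have hA : pvALoop l 0 = (List.foldl pvStep 0 l) % 13 := by
    simpa using pvALoop_eq l 0
  have hB := pvBlockLoop_modeq l l.length le_rfl 0 1 (Or.inl rfl)
  rw [List.take_length] at hB
  have hBmod : PySem.Int.mod (pvBlockLoop l l.length 0 1) 13 = (List.foldl pvStep 0 l) % 13 := by
    rw [PySem.Int.mod_eq_emod_of_pos (by norm_num)]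
    simpa using hB
  rw [hA, hBmod]

theorem pv_ports_eq (s : String) : is_divisible_by_13 s = is_divisible_by_13_alt s := by
  unfold is_divisible_by_13 is_divisible_by_13_alt
  cases h : s.toList with
  | nil => rfl
  | cons c rest => simp only [pv_key]

-- ===== VERDICT (by name: the statement is the Claim_ definition above) =====
theorem is_divisible_by_13_spec : Claim_equal_is_divisible_by_13 := by
  intro s _
  unfold Spec_is_divisible_by_13
  exact pv_ports_eq s
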